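-- pv_equiv track=rewrite | github.com/Agentic-Environmental-Engineering/GymVerse | gem/gem/envs/RLVE/sum_pseudo_euclidean_env.py | _solve
-- ===== SOURCE A (Python) =====
-- def _solve(N: int) -> int:
--     """Compute the sum using the number-theory decomposition from the original environment."""
--     def count_odds(x: int, y: int) -> int:
--         length = y - x + 1
--         if (length & 1) and (x & 1):
--             return (length >> 1) + 1
--         else:
--             return length >> 1
--
--     def block_sum(l: int, k: int, N: int) -> int:
--         total = 0
--         while l <= k:
--             lg = l.bit_length() - 1
--             r = min((1 << (lg + 1)) - 1, k)
--             total += lg * (N // l) * count_odds(l, r)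
--             l = r + 1
--         return total
--
--     ans = 0
--     l = 1
--     while l <= N:
--         v = N // l
--         r = N // v
--         ans += block_sum(l, r, N)
--         l = r + 1
--     return ans * 2
-- ===== SOURCE B (Python) =====
-- def _solve(N: int) -> int:
--     """Prefix-sum formulation: ans = 2 * sum over quotient blocks of v * (G(r) - G(l-1)),
--     where G(x) is the closed-form prefix sum of (m.bit_length() - 1) over odd m <= x."""
--     def G(x: int) -> int:
--         # sum of (m.bit_length() - 1) over odd m in [1, x]
--         s = 0
--         j = 1
--         while (1 << j) <= x:
--             hi = min((1 << (j + 1)) - 1, x)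
--             s += j * ((hi + 1) // 2 - (1 << (j - 1)))
--             j += 1
--         return s
--
--     total = 0
--     l = 1
--     prev = 0  # G(l - 1)
--     while l <= N:
--         v = N // l
--         r = N // v
--         g = G(r)
--         total += v * (g - prev)
--         prev = g
--         l = r + 1
--     return total * 2
-- ===== Notes on version B (the rewrite author's own statement) =====
-- stated objective: alternative
-- what changed: Replaced A's per-block re-decomposition (inner while loop walking power-of-two segments with the count_odds helper inside every quotient block) by prefix sums: a closed-form prefix function G(x) = sum of (bit_length(m)-1) over odd m <= x, evaluated once per quotient block and combined as v * (G(r) - G(l-1)) with a running previous value.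
import Mathlib
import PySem

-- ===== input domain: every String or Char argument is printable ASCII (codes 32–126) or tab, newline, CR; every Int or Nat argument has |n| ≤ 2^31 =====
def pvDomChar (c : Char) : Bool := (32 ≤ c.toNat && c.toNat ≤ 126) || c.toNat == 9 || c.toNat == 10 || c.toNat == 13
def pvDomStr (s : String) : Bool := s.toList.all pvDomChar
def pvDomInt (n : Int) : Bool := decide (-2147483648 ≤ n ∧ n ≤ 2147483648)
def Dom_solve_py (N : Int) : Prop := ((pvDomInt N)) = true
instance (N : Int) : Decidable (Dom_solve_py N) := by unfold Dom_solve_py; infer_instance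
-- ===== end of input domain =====

-- B replaces A's per-quotient-block re-decomposition (inner segment walk + count_odds)
-- by a prefix-sum function G(x) = Σ_{odd m ≤ x} (bit_length(m)-1), combined per block as
-- v * (G(r) - G(l-1)) with a running previous value (alternative formulation, not faster).

-- ===== PORT A =====
-- count_odds(x, y): Python's `x & 1` is PySem.Int.band x 1; `n >> 1` is Lean's `n >>> 1`.
def pvCountOdds (x y : Int) : Int :=
  let length := y - x + 1
  if PySem.Int.band length 1 ≠ 0 ∧ PySem.Int.band x 1 ≠ 0 then
    (length >>> (1 : Nat)) + 1
  else
    length >>> (1 : Nat)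

-- block_sum's while loop; fuel (k - l + 1).toNat bounds the number of iterations
-- (l strictly increases each pass), so the recursion computes exactly the Python loop.
def pvBlockSumGo (N k : Int) : Nat → Int → Int → Int
  | 0, _, total => total
  | fuel + 1, l, total =>
    if l ≤ k then
      let lg : Int := (PySem.Int.bitLength l : Int) - 1
      -- `1 << (lg+1)`: the shift amount lg+1 is ≥ 0 in every call (l ≥ 1), so .toNat is exact
      let r := min (((1 : Int) <<< (lg + 1).toNat) - 1) k
      pvBlockSumGo N k fuel (r + 1) (total + lg * PySem.Int.floordiv N l * pvCountOdds l r)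
    else total

def pvBlockSum (l k N : Int) : Int := pvBlockSumGo N k (k - l + 1).toNat l 0

-- outer while loop of _solve; fuel N.toNat + 1 bounds its iterations (l strictly increases)
def pvSolveGo (N : Int) : Nat → Int → Int → Int
  | 0, _, ans => ans
  | fuel + 1, l, ans =>
    if l ≤ N then
      let v := PySem.Int.floordiv N l
      let r := PySem.Int.floordiv N v
      pvSolveGo N fuel (r + 1) (ans + pvBlockSum l r N)
    else ans

def solve_py (N : Int) : Int := pvSolveGo N (N.toNat + 1) 1 0 * 2

-- ===== PORT B =====
-- G(x): inner while loop of Source B over j; fuel x.toNat + 1 bounds its iterations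
-- (the loop stops once 2^j > x, and 2^j grows past x within x+1 steps).
-- `1 << j`, `1 << (j+1)`, `1 << (j-1)`: shift amounts are ≥ 0 in every call (j ≥ 1), so .toNat is exact.
def pvGGo (x : Int) : Nat → Int → Int → Int
  | 0, _, s => s
  | fuel + 1, j, s =>
    if (1 : Int) <<< j.toNat ≤ x then
      let hi := min (((1 : Int) <<< (j + 1).toNat) - 1) x
      pvGGo x fuel (j + 1)
        (s + j * (PySem.Int.floordiv (hi + 1) 2 - ((1 : Int) <<< (j - 1).toNat)))
    else s

def pvG (x : Int) : Int := pvGGo x (x.toNat + 1) 1 0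

-- outer while loop of Source B; fuel N.toNat + 1 bounds its iterations (l strictly increases)
def pvAltGo (N : Int) : Nat → Int → Int → Int → Int
  | 0, _, _, total => total
  | fuel + 1, l, prev, total =>
    if l ≤ N then
      let v := PySem.Int.floordiv N l
      let r := PySem.Int.floordiv N v
      let g := pvG r
      pvAltGo N fuel (r + 1) g (total + v * (g - prev))
    else total

def solve_py_alt (N : Int) : Int := pvAltGo N (N.toNat + 1) 1 0 0 * 2

-- ===== PRECONDITION & SPEC =====
def Spec_solve_py (N : Int) (out : Int) : Prop := out = solve_py_alt N
instance (N : Int) (out : Int) : Decidable (Spec_solve_py N out) := by unfold Spec_solve_py; infer_instance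

-- ===== CLAIM (what is proved, stated in full; the proofs are below) =====
def Claim_equal_solve_py : Prop := ∀ (N : Int), Dom_solve_py N → Spec_solve_py N (solve_py N)

-- ===== LEMMAS AND PROOFS =====

-- the common mathematical value both loops compute:
-- pvSum n l c = Σ_{m = l}^{l+c-1} pvTerm n m,  pvTerm = (bit_length(m)-1)·(n//m) on odd m
def pvTerm (n m : ℕ) : Int :=
  if m % 2 = 1 then ((PySem.Int.bitLength (m : Int) : Int) - 1) * ((n / m : ℕ) : Int) else 0

def pvSum (n : ℕ) : ℕ → ℕ → Int
  | _, 0 => 0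
  | l, c + 1 => pvTerm n l + pvSum n (l + 1) c

-- number of odd integers among l, l+1, …, l+c-1
def pvOddCount (l c : ℕ) : ℕ := if l % 2 = 1 then (c + 1) / 2 else c / 2

theorem pvSum_split (n : ℕ) :
    ∀ (c₁ c₂ l : ℕ), pvSum n l (c₁ + c₂) = pvSum n l c₁ + pvSum n (l + c₁) c₂ := by
  intro c₁
  induction c₁ with
  | zero => intro c₂ l; simp [pvSum]
  | succ c ih =>
    intro c₂ l
    have : c + 1 + c₂ = (c + c₂) + 1 := by omega
    rw [this]
    show pvTerm n l + pvSum n (l + 1) (c + c₂) = (pvTerm n l + pvSum n (l + 1) c) + _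
    rw [ih c₂ (l + 1)]
    have : l + 1 + c = l + (c + 1) := by omega
    rw [this]; ring

theorem pv_bitLength_pos (l : ℕ) (hl : 1 ≤ l) : 1 ≤ PySem.Int.bitLength (l : Int) := by
  by_contra h
  have h0 : PySem.Int.bitLength (l : Int) = 0 := by omega
  have := PySem.Int.lt_two_pow_bitLength (l : Int)
  rw [h0] at this
  simp at this
  omega

theorem pv_bitLength_const (l m : ℕ) (hl : 1 ≤ l) (hlm : l ≤ m)
    (hm : m < 2 ^ PySem.Int.bitLength (l : Int)) :
    PySem.Int.bitLength (m : Int) = PySem.Int.bitLength (l : Int) := by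
  have hm1 : 1 ≤ m := le_trans hl hlm
  set a := PySem.Int.bitLength (m : Int) with ha
  set b := PySem.Int.bitLength (l : Int) with hb
  have hma : m < 2 ^ a := by
    have := PySem.Int.lt_two_pow_bitLength (m : Int)
    simpa using this
  have hma2 : 2 ^ (a - 1) ≤ m := by
    have := PySem.Int.two_pow_bitLength_le (m : Int) (by simp; omega)
    simpa using this
  have hlb2 : 2 ^ (b - 1) ≤ l := by
    have := PySem.Int.two_pow_bitLength_le (l : Int) (by simp; omega)
    simpa using this
  have hapos : 1 ≤ a := by
    by_contra h
    have : a = 0 := by omega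
    rw [this] at hma; simp at hma; omega
  have hbpos : 1 ≤ b := by
    by_contra h
    have h0 : b = 0 := by omega
    have := hm; rw [h0] at this; simp at this; omega
  rcases lt_trichotomy a b with h | h | h
  · exfalso
    have : (2 : ℕ) ^ a ≤ 2 ^ (b - 1) := Nat.pow_le_pow_right (by norm_num) (by omega)
    omega
  · exact h
  · exfalso
    have : (2 : ℕ) ^ b ≤ 2 ^ (a - 1) := Nat.pow_le_pow_right (by norm_num) (by omega)
    omega

theorem pvCountOdds_eval (x y : ℕ) (hxy : x ≤ y) :
    pvCountOdds (x : Int) (y : Int) = ((pvOddCount x (y + 1 - x) : ℕ) : Int) := by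
  set c := y + 1 - x with hc
  have hlen : (y : Int) - x + 1 = (c : Int) := by omega
  have hb1 : PySem.Int.band (c : Int) 1 = ((c % 2 : ℕ) : Int) := by
    have := PySem.Int.band_natCast c 1
    simpa [Nat.and_one_is_mod] using this
  have hb2 : PySem.Int.band (x : Int) 1 = ((x % 2 : ℕ) : Int) := by
    have := PySem.Int.band_natCast x 1
    simpa [Nat.and_one_is_mod] using this
  have hsh : ((c : Int) >>> (1 : Nat)) = ((c / 2 : ℕ) : Int) := by
    have : ((c : Int) >>> (1 : Nat)) = ((c >>> 1 : ℕ) : Int) := Int.mem_toNat?.mp rfl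
    simpa [Nat.shiftRight_one] using this
  simp only [pvCountOdds, pvOddCount, hlen, hb1, hb2, hsh]
  rcases Nat.mod_two_eq_zero_or_one c with h | h <;>
    rcases Nat.mod_two_eq_zero_or_one x with h2 | h2 <;>
    simp [h, h2] <;> omega

theorem pvSum_const (n bl v : ℕ) : ∀ (c l : ℕ), 1 ≤ l →
    (∀ m, l ≤ m → m < l + c → m % 2 = 1 →
      PySem.Int.bitLength (m : Int) = bl ∧ n / m = v) →
    pvSum n l c = ((bl : ℕ) - 1 : Int) * (v : Int) * ((pvOddCount l c : ℕ) : Int) := by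
  intro c
  induction c with
  | zero =>
    intro l _ _
    show (0 : Int) = _
    have : pvOddCount l 0 = 0 := by simp [pvOddCount]
    rw [this]; simp
  | succ c ih =>
    intro l hl h
    show pvTerm n l + pvSum n (l + 1) c = _
    rw [ih (l + 1) (by omega) (fun m h1 h2 h3 => h m (by omega) (by omega) h3)]
    rcases Nat.mod_two_eq_zero_or_one l with hp | hp
    · have hp1 : (l + 1) % 2 = 1 := by omega
      have e1 : pvOddCount (l + 1) c = (c + 1) / 2 := by simp [pvOddCount, hp1]
      have e2 : pvOddCount l (c + 1) = (c + 1) / 2 := by simp [pvOddCount, hp]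
      simp [pvTerm, hp, e1, e2]
    · have hp1 : (l + 1) % 2 = 0 := by omega
      obtain ⟨hb, hv⟩ := h l (le_refl l) (by omega) hp
      have e1 : pvOddCount (l + 1) c = c / 2 := by simp [pvOddCount, hp1]
      have e2 : pvOddCount l (c + 1) = c / 2 + 1 := by
        simp [pvOddCount, hp]; omega
      rw [e1, e2]
      simp only [pvTerm, hp, hb, hv]
      push_cast
      ring

theorem pv_div_block (n l : ℕ) (h1 : 1 ≤ l) (hln : l ≤ n) :
    l ≤ n / (n / l) ∧ ∀ m, l ≤ m → m ≤ n / (n / l) → n / m = n / l := by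
  have hv : 1 ≤ n / l := (Nat.one_le_div_iff (by omega)).mpr hln
  have hkey : ∀ a : ℕ, 1 ≤ a → a * (n / a) ≤ n := by
    intro a _
    calc a * (n / a) = n / a * a := by ring
      _ ≤ n := Nat.div_mul_le_self n a
  constructor
  · rw [Nat.le_div_iff_mul_le (by omega)]
    exact hkey l h1
  · intro m hm1 hm2
    have hle : n / m ≤ n / l := Nat.div_le_div_left hm1 (by omega)
    have hge : n / l ≤ n / m := by
      rw [Nat.le_div_iff_mul_le (by omega)]
      calc n / l * m ≤ n / l * (n / (n / l)) := Nat.mul_le_mul_left _ hm2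
        _ ≤ n := hkey (n / l) hv
    omega

theorem pvBlockSumGo_eq (n v k : ℕ) : ∀ (fuel : Nat) (l : ℕ) (total : Int), 1 ≤ l →
    (∀ m, l ≤ m → m ≤ k → n / m = v) → k + 1 - l ≤ fuel →
    pvBlockSumGo (n : Int) (k : Int) fuel (l : Int) total = total + pvSum n l (k + 1 - l) := by
  intro fuel
  induction fuel with
  | zero =>
    intro l total hl hq hf
    have : k + 1 - l = 0 := by omega
    rw [this]
    simp [pvBlockSumGo, pvSum]
  | succ fuel ih =>
    intro l total hl hq hf
    show (if (l : Int) ≤ (k : Int) then _ else _) = _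
    by_cases hlk : l ≤ k
    · rw [if_pos (by exact_mod_cast hlk)]
      set bl := PySem.Int.bitLength (l : Int) with hbl
      have hbl1 : 1 ≤ bl := pv_bitLength_pos l hl
      have hl2 : l < 2 ^ bl := by
        have := PySem.Int.lt_two_pow_bitLength (l : Int)
        simpa using this
      have htn : (((bl : Int) - 1) + 1).toNat = bl := by omega
      have hshift : (1 : Int) <<< (((bl : Int) - 1) + 1).toNat = ((2 ^ bl : ℕ) : Int) := by
        rw [htn]; simp [Int.shiftLeft_eq]
      set rN := min (2 ^ bl - 1) k with hrN
      have hrcast : min (((1 : Int) <<< (((bl : Int) - 1) + 1).toNat) - 1) (k : Int) = (rN : Int) := by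
        rw [hshift, hrN]
        rw [Nat.cast_min]
        congr 1
        have : 1 ≤ 2 ^ bl := Nat.one_le_two_pow
        push_cast [this]
        ring
      simp only [hrcast]
      have hlr : l ≤ rN := by omega
      have hrk : rN ≤ k := by omega
      have hfd : PySem.Int.floordiv (n : Int) (l : Int) = ((n / l : ℕ) : Int) := by
        exact_mod_cast PySem.Int.floordiv_natCast n l
      have hco := pvCountOdds_eval l rN hlr
      have hsc : pvSum n l (rN + 1 - l)
          = ((bl : ℕ) - 1 : Int) * ((v : ℕ) : Int) * ((pvOddCount l (rN + 1 - l) : ℕ) : Int) := by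
        apply pvSum_const n bl v (rN + 1 - l) l hl
        intro m h1 h2 _
        constructor
        · have hone : 1 ≤ 2 ^ bl := Nat.one_le_two_pow
          have hmlt : m < 2 ^ bl := by omega
          exact pv_bitLength_const l m hl h1 (hbl ▸ hmlt)
        · exact hq m h1 (by omega)
      have hterm : ((bl : Int) - 1) * PySem.Int.floordiv (n : Int) (l : Int) * pvCountOdds (l : Int) (rN : Int)
          = pvSum n l (rN + 1 - l) := by
        rw [hfd, hco, hsc, hq l (le_refl l) hlk]
      have hsplit : pvSum n l (k + 1 - l) = pvSum n l (rN + 1 - l) + pvSum n (rN + 1) (k - rN) := by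
        have h1 : k + 1 - l = (rN + 1 - l) + (k - rN) := by omega
        rw [h1, pvSum_split]
        congr 2
        omega
      have hrec := ih (rN + 1) (total + ((bl : Int) - 1) * PySem.Int.floordiv (n : Int) (l : Int) * pvCountOdds (l : Int) (rN : Int))
        (by omega) (fun m hm1 hm2 => hq m (by omega) hm2) (by omega)
      rw [show ((rN + 1 : ℕ) : Int) = (rN : Int) + 1 by push_cast; ring] at hrec
      rw [hrec, hterm, hsplit]
      have : k + 1 - (rN + 1) = k - rN := by omega
      rw [this]
      ring
    · rw [if_neg (by exact_mod_cast hlk)]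
      have : k + 1 - l = 0 := by omega
      rw [this]
      simp [pvSum]

theorem pvSolveGo_eq (n : ℕ) : ∀ (fuel : Nat) (l : ℕ) (ans : Int), 1 ≤ l → n + 1 - l ≤ fuel →
    pvSolveGo (n : Int) fuel (l : Int) ans = ans + pvSum n l (n + 1 - l) := by
  intro fuel
  induction fuel with
  | zero =>
    intro l ans hl hf
    have : n + 1 - l = 0 := by omega
    rw [this]
    simp [pvSolveGo, pvSum]
  | succ fuel ih =>
    intro l ans hl hf
    show (if (l : Int) ≤ (n : Int) then _ else _) = _
    by_cases hln : l ≤ n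
    · rw [if_pos (by exact_mod_cast hln)]
      have hfd1 : PySem.Int.floordiv (n : Int) (l : Int) = ((n / l : ℕ) : Int) := by
        exact_mod_cast PySem.Int.floordiv_natCast n l
      have hfd2 : PySem.Int.floordiv (n : Int) ((n / l : ℕ) : Int) = ((n / (n / l) : ℕ) : Int) := by
        exact_mod_cast PySem.Int.floordiv_natCast n (n / l)
      set rN := n / (n / l) with hrN
      obtain ⟨hlr, hq⟩ := pv_div_block n l hl hln
      have hrn : rN ≤ n := Nat.div_le_self _ _
      have hfuel : ((rN : Int) - (l : Int) + 1).toNat = rN + 1 - l := by omega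
      have hbs : pvBlockSum (l : Int) (rN : Int) (n : Int) = pvSum n l (rN + 1 - l) := by
        unfold pvBlockSum
        rw [hfuel]
        have := pvBlockSumGo_eq n (n / l) rN (rN + 1 - l) l 0 hl hq (le_refl _)
        rw [this]
        ring
      have hrec := ih (rN + 1) (ans + pvBlockSum (l : Int) (rN : Int) (n : Int)) (by omega) (by omega)
      simp only [hfd1, hfd2]
      rw [show ((rN + 1 : ℕ) : Int) = (rN : Int) + 1 by push_cast; ring] at hrec
      rw [hrec, hbs]
      have hsplit : pvSum n l (n + 1 - l) = pvSum n l (rN + 1 - l) + pvSum n (rN + 1) (n + 1 - (rN + 1)) := by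
        have h1 : n + 1 - l = (rN + 1 - l) + (n + 1 - (rN + 1)) := by omega
        rw [h1, pvSum_split]
        congr 2
        omega
      rw [hsplit]
      ring
    · rw [if_neg (by exact_mod_cast hln)]
      have : n + 1 - l = 0 := by omega
      rw [this]
      simp [pvSum]

def pvWTerm (m : ℕ) : Int :=
  if m % 2 = 1 then (PySem.Int.bitLength (m : Int) : Int) - 1 else 0
def pvW : ℕ → ℕ → Int
  | _, 0 => 0
  | l, c + 1 => pvWTerm l + pvW (l + 1) c

theorem pvW_split : ∀ (c₁ c₂ l : ℕ), pvW l (c₁ + c₂) = pvW l c₁ + pvW (l + c₁) c₂ := by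
  intro c₁
  induction c₁ with
  | zero => intro c₂ l; simp [pvW]
  | succ c ih =>
    intro c₂ l
    have : c + 1 + c₂ = (c + c₂) + 1 := by omega
    rw [this]
    show pvWTerm l + pvW (l + 1) (c + c₂) = (pvWTerm l + pvW (l + 1) c) + _
    rw [ih c₂ (l + 1)]
    have : l + 1 + c = l + (c + 1) := by omega
    rw [this]; ring

theorem pv_bitLength_interval (j m : ℕ) (h1 : 2 ^ j ≤ m) (h2 : m < 2 ^ (j + 1)) :
    PySem.Int.bitLength (m : Int) = j + 1 := by
  have hm1 : 1 ≤ m := le_trans Nat.one_le_two_pow h1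
  set a := PySem.Int.bitLength (m : Int) with ha
  have hma : m < 2 ^ a := by
    have := PySem.Int.lt_two_pow_bitLength (m : Int)
    simpa using this
  have hma2 : 2 ^ (a - 1) ≤ m := by
    have := PySem.Int.two_pow_bitLength_le (m : Int) (by simp; omega)
    simpa using this
  have hapos : 1 ≤ a := by
    by_contra h
    have : a = 0 := by omega
    rw [this] at hma; simp at hma; omega
  rcases lt_trichotomy a (j + 1) with h | h | h
  · exfalso
    have : (2 : ℕ) ^ a ≤ 2 ^ j := Nat.pow_le_pow_right (by norm_num) (by omega)
    omega
  · exact h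
  · exfalso
    have : (2 : ℕ) ^ (j + 1) ≤ 2 ^ (a - 1) := Nat.pow_le_pow_right (by norm_num) (by omega)
    omega

theorem pvW_const (bl : ℕ) : ∀ (c l : ℕ), 1 ≤ l →
    (∀ m, l ≤ m → m < l + c → m % 2 = 1 → PySem.Int.bitLength (m : Int) = bl) →
    pvW l c = ((bl : ℕ) - 1 : Int) * ((pvOddCount l c : ℕ) : Int) := by
  intro c
  induction c with
  | zero =>
    intro l _ _
    show (0 : Int) = _
    have : pvOddCount l 0 = 0 := by simp [pvOddCount]
    rw [this]; simp
  | succ c ih =>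
    intro l hl h
    show pvWTerm l + pvW (l + 1) c = _
    rw [ih (l + 1) (by omega) (fun m h1 h2 h3 => h m (by omega) (by omega) h3)]
    rcases Nat.mod_two_eq_zero_or_one l with hp | hp
    · have hp1 : (l + 1) % 2 = 1 := by omega
      have e1 : pvOddCount (l + 1) c = (c + 1) / 2 := by simp [pvOddCount, hp1]
      have e2 : pvOddCount l (c + 1) = (c + 1) / 2 := by simp [pvOddCount, hp]
      simp [pvWTerm, hp, e1, e2]
    · have hp1 : (l + 1) % 2 = 0 := by omega
      have hb := h l (le_refl l) (by omega) hp
      have e1 : pvOddCount (l + 1) c = c / 2 := by simp [pvOddCount, hp1]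
      have e2 : pvOddCount l (c + 1) = c / 2 + 1 := by
        simp [pvOddCount, hp]; omega
      rw [e1, e2]
      simp only [pvWTerm, hp, hb]
      push_cast
      ring

theorem pvSum_factor (n v : ℕ) : ∀ (c l : ℕ),
    (∀ m, l ≤ m → m < l + c → n / m = v) →
    pvSum n l c = ((v : ℕ) : Int) * pvW l c := by
  intro c
  induction c with
  | zero => intro l _; show (0 : Int) = _; simp [pvW]
  | succ c ih =>
    intro l h
    show pvTerm n l + pvSum n (l + 1) c = (v : Int) * (pvWTerm l + pvW (l + 1) c)
    rw [ih (l + 1) (fun m h1 h2 => h m (by omega) (by omega))]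
    have hv := h l (le_refl l) (by omega)
    rcases Nat.mod_two_eq_zero_or_one l with hp | hp
    · simp [pvTerm, pvWTerm, hp]
    · simp only [pvTerm, pvWTerm, hp, hv]
      norm_num
      ring

theorem pvGGo_eq (x : ℕ) : ∀ (fuel : Nat) (j : ℕ) (s : Int), 1 ≤ j → x < 2 ^ (j + fuel) →
    pvGGo (x : Int) fuel (j : Int) s = s + pvW (2 ^ j) (x + 1 - 2 ^ j) := by
  intro fuel
  induction fuel with
  | zero =>
    intro j s hj hf
    rw [Nat.add_zero] at hf
    have : x + 1 - 2 ^ j = 0 := by omega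
    rw [this]
    simp [pvGGo, pvW]
  | succ fuel ih =>
    intro j s hj hf
    have htj : ((j : Int)).toNat = j := by omega
    have hsh : ∀ b : ℕ, (1 : Int) <<< b = ((2 ^ b : ℕ) : Int) := by
      intro b; simp [Int.shiftLeft_eq]
    show (if (1 : Int) <<< ((j : Int)).toNat ≤ (x : Int) then _ else _) = _
    rw [htj, hsh j]
    by_cases hguard : 2 ^ j ≤ x
    · rw [if_pos (by exact_mod_cast hguard)]
      have htj1 : ((j : Int) + 1).toNat = j + 1 := by omega
      have htjm : ((j : Int) - 1).toNat = j - 1 := by omega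
      set hiN := min (2 ^ (j + 1) - 1) x with hhiN
      have hone : (1 : ℕ) ≤ 2 ^ (j + 1) := Nat.one_le_two_pow
      have hhicast : min (((1 : Int) <<< ((j : Int) + 1).toNat) - 1) (x : Int) = (hiN : Int) := by
        rw [htj1, hsh (j + 1), hhiN, Nat.cast_min]
        congr 1
        push_cast [hone]
        ring
      simp only [hhicast, htjm, hsh (j - 1)]
      -- the added term equals the segment sum pvW (2^j) (hiN + 1 - 2^j)
      have hfd : PySem.Int.floordiv ((hiN : Int) + 1) 2 = (((hiN + 1) / 2 : ℕ) : Int) := by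
        rw [show ((hiN : Int) + 1) = ((hiN + 1 : ℕ) : Int) by push_cast; ring]
        exact_mod_cast PySem.Int.floordiv_natCast (hiN + 1) 2
      have hp2 : 2 ^ j = 2 * 2 ^ (j - 1) := by
        rw [← pow_succ']
        congr 1
        omega
      have hp4 : 2 ^ (j + 1) = 2 * 2 ^ j := by rw [← pow_succ']
      have hlo : 2 ^ j ≤ hiN := by omega
      have hcnt : pvOddCount (2 ^ j) (hiN + 1 - 2 ^ j) = (hiN + 1) / 2 - 2 ^ (j - 1) := by
        have hev : 2 ^ j % 2 = 0 := by omega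
        simp only [pvOddCount, hev]
        norm_num
        omega
      have hseg : pvW (2 ^ j) (hiN + 1 - 2 ^ j)
          = ((j + 1 : ℕ) - 1 : Int) * ((pvOddCount (2 ^ j) (hiN + 1 - 2 ^ j) : ℕ) : Int) := by
        apply pvW_const (j + 1) _ _ (Nat.one_le_two_pow)
        intro m h1 h2 _
        exact pv_bitLength_interval j m h1 (by omega)
      have hterm : (j : Int) * ((((hiN + 1) / 2 : ℕ) : Int) - ((2 ^ (j - 1) : ℕ) : Int))
          = pvW (2 ^ j) (hiN + 1 - 2 ^ j) := by
        rw [hseg, hcnt]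
        have hge : 2 ^ (j - 1) ≤ (hiN + 1) / 2 := by omega
        push_cast [hge]
        ring
      have hsplit : pvW (2 ^ j) (x + 1 - 2 ^ j)
          = pvW (2 ^ j) (hiN + 1 - 2 ^ j) + pvW (hiN + 1) (x - hiN) := by
        have h1 : x + 1 - 2 ^ j = (hiN + 1 - 2 ^ j) + (x - hiN) := by omega
        rw [h1, pvW_split]
        congr 2
        omega
      have hfx : x < 2 ^ (j + 1 + fuel) := by
        have h : j + 1 + fuel = j + (fuel + 1) := by omega
        rw [h]; exact hf
      have hrec := ih (j + 1) (s + (j : Int) * (PySem.Int.floordiv ((hiN : Int) + 1) 2 - ((2 ^ (j - 1) : ℕ) : Int)))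
        (by omega) hfx
      rw [show ((j + 1 : ℕ) : Int) = (j : Int) + 1 by push_cast; ring] at hrec
      rw [hrec, hfd, hterm, hsplit]
      by_cases hcase : 2 ^ (j + 1) - 1 ≤ x
      · have he1 : hiN = 2 ^ (j + 1) - 1 := by omega
        have he2 : hiN + 1 = 2 ^ (j + 1) := by omega
        have he3 : x - hiN = x + 1 - 2 ^ (j + 1) := by omega
        rw [he2, he3]
        ring
      · have he1 : hiN = x := by omega
        have hz1 : x + 1 - 2 ^ (j + 1) = 0 := by omega
        have hz2 : x - hiN = 0 := by omega
        rw [hz1, hz2]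
        simp [pvW]
    · rw [if_neg (by exact_mod_cast hguard)]
      have : x + 1 - 2 ^ j = 0 := by omega
      rw [this]
      simp [pvW]

theorem pvG_eq (x : ℕ) : pvG (x : Int) = pvW 1 x := by
  unfold pvG
  have ht : ((x : Int)).toNat = x := by omega
  rw [ht]
  have hx2 : x < 2 ^ (1 + (x + 1)) := by
    calc x < 2 ^ x := Nat.lt_two_pow_self
      _ ≤ 2 ^ (1 + (x + 1)) := Nat.pow_le_pow_right (by norm_num) (by omega)
  rw [show ((1 : Int)) = ((1 : ℕ) : Int) by norm_num]
  rw [pvGGo_eq x (x + 1) 1 0 (le_refl 1) hx2]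
  rcases Nat.eq_zero_or_pos x with h0 | hpos
  · rw [h0]
    simp [pvW]
  · have hx1 : x = (x - 1) + 1 := by omega
    have hwt1 : pvWTerm 1 = 0 := by
      simp [pvWTerm]
      decide
    calc 0 + pvW 2 (x + 1 - 2) = pvW 2 (x - 1) := by
            rw [show x + 1 - 2 = x - 1 by omega]; ring
      _ = pvWTerm 1 + pvW 2 (x - 1) := by rw [hwt1]; ring
      _ = pvW 1 x := by rw [hx1]; rfl


theorem pvAltGo_eq (n : ℕ) : ∀ (fuel : Nat) (l : ℕ) (total : Int), 1 ≤ l → n + 1 - l ≤ fuel →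
    pvAltGo (n : Int) fuel (l : Int) (pvW 1 (l - 1)) total = total + pvSum n l (n + 1 - l) := by
  intro fuel
  induction fuel with
  | zero =>
    intro l total hl hf
    have : n + 1 - l = 0 := by omega
    rw [this]
    simp [pvAltGo, pvSum]
  | succ fuel ih =>
    intro l total hl hf
    show (if (l : Int) ≤ (n : Int) then _ else _) = _
    by_cases hln : l ≤ n
    · rw [if_pos (by exact_mod_cast hln)]
      have hfd1 : PySem.Int.floordiv (n : Int) (l : Int) = ((n / l : ℕ) : Int) := by
        exact_mod_cast PySem.Int.floordiv_natCast n l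
      have hfd2 : PySem.Int.floordiv (n : Int) ((n / l : ℕ) : Int) = ((n / (n / l) : ℕ) : Int) := by
        exact_mod_cast PySem.Int.floordiv_natCast n (n / l)
      set rN := n / (n / l) with hrN
      obtain ⟨hlr, hq⟩ := pv_div_block n l hl hln
      have hrn : rN ≤ n := Nat.div_le_self _ _
      have hg : pvG ((rN : ℕ) : Int) = pvW 1 rN := pvG_eq rN
      -- the block's contribution
      have hW1 : pvW 1 rN = pvW 1 (l - 1) + pvW l (rN + 1 - l) := by
        have h1 : rN = (l - 1) + (rN + 1 - l) := by omega
        calc pvW 1 rN = pvW 1 ((l - 1) + (rN + 1 - l)) := by rw [← h1]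
          _ = pvW 1 (l - 1) + pvW (1 + (l - 1)) (rN + 1 - l) := pvW_split _ _ _
          _ = pvW 1 (l - 1) + pvW l (rN + 1 - l) := by rw [show 1 + (l - 1) = l by omega]
      have hblock : ((n / l : ℕ) : Int) * (pvW 1 rN - pvW 1 (l - 1)) = pvSum n l (rN + 1 - l) := by
        rw [hW1]
        rw [pvSum_factor n (n / l) (rN + 1 - l) l (fun m hm1 hm2 => hq m hm1 (by omega))]
        ring
      have hrec := ih (rN + 1) (total + ((n / l : ℕ) : Int) * (pvW 1 rN - pvW 1 (l - 1)))
        (by omega) (by omega)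
      rw [show (rN + 1 : ℕ) - 1 = rN by omega] at hrec
      rw [show ((rN + 1 : ℕ) : Int) = (rN : Int) + 1 by push_cast; ring] at hrec
      simp only [hfd1, hfd2, hg]
      rw [hrec, hblock]
      have hsplit : pvSum n l (n + 1 - l) = pvSum n l (rN + 1 - l) + pvSum n (rN + 1) (n + 1 - (rN + 1)) := by
        have h1 : n + 1 - l = (rN + 1 - l) + (n + 1 - (rN + 1)) := by omega
        rw [h1, pvSum_split]
        congr 2
        omega
      rw [hsplit]
      ring
    · rw [if_neg (by exact_mod_cast hln)]
      have : n + 1 - l = 0 := by omega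
      rw [this]
      simp [pvSum]


theorem pv_solve_eq (N : Int) : solve_py N = solve_py_alt N := by
  unfold solve_py solve_py_alt
  by_cases hN : N ≤ 0
  · have h1 : ¬ ((1 : Int) ≤ N) := by omega
    have ht : N.toNat = 0 := by omega
    rw [ht]
    simp [pvSolveGo, pvAltGo, h1]
  · have hNn : N = ((N.toNat : ℕ) : Int) := by omega
    set n := N.toNat with hn
    rw [hNn]
    rw [show ((1 : Int)) = ((1 : ℕ) : Int) by norm_num]
    have hB := pvAltGo_eq n (n + 1) 1 0 (le_refl 1) (by omega)
    rw [show pvW 1 (1 - 1) = 0 from rfl] at hB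
    rw [pvSolveGo_eq n (n + 1) 1 0 (le_refl 1) (by omega), hB]

-- ===== VERDICT (by name: the statement is the Claim_ definition above) =====
theorem solve_py_spec : Claim_equal_solve_py := by
  intro N _
  unfold Spec_solve_py
  exact pv_solve_eq N
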